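-- pv_equiv track=rewrite | github.com/ArtemDMI/ArtemDMI.github.io | start/remove_empty_lines.py | _expand_single_dash_runs
-- ===== SOURCE A (Python) =====
-- def _expand_single_dash_runs(lines: list[str]) -> list[str]:
--     """
--     Заменяет каждую серию ровно из одной строки '-' на две строки '-',
--     чтобы следовать схеме translate-02-eng (между блоками — не одна, а две строки с тире).
--     """
--     result: list[str] = []
--     i = 0
--     while i < len(lines):
--         if lines[i].strip() == "-":
--             run_end = i
--             while run_end < len(lines) and lines[run_end].strip() == "-":
--                 run_end += 1
--             run_len = run_end - i
--             if run_len == 1: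
--                 result.append("-")
--                 result.append("-")
--             else:
--                 result.extend(lines[i:run_end])
--             i = run_end
--         else:
--             result.append(lines[i])
--             i += 1
--     return result
-- ===== SOURCE B (Python) =====
-- def _expand_single_dash_runs(lines: list[str]) -> list[str]:
--     # Local-window algorithm: a dash line becomes two dashes exactly when
--     # neither neighbour is a dash; no run detection needed.
--     dashes = [s.strip() == "-" for s in lines]
--     out: list[str] = []
--     for prev, cur, nxt, s in zip([False] + dashes, dashes, dashes[1:] + [False], lines):
--         out += ["-", "-"] if cur and not prev and not nxt else [s]
--     return out
-- ===== Notes on version B (the rewrite author's own statement) =====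
-- stated objective: alternative
-- what changed: Replaced A's run-detection (while-loop with an inner lookahead scan finding each maximal dash run, then slicing) by a local stencil: precompute a boolean dash mask, zip it with its two shifted copies, and decide each line purely from its two neighbours (a lone dash with no dash neighbour is emitted twice, everything else is kept).
import Mathlib
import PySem

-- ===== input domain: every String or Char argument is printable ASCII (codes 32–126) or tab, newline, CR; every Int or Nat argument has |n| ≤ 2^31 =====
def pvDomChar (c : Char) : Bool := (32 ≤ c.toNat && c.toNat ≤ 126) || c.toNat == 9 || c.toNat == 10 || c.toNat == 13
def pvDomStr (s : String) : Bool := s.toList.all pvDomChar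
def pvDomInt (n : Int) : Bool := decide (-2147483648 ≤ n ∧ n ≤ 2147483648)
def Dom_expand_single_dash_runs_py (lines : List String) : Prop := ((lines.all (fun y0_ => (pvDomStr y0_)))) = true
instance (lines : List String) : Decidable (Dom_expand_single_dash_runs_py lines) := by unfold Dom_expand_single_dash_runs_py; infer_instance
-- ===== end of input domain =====

-- ===== PORT A =====
-- B replaces A's run-detection while-loop by a local neighbour-mask stencil; objective: alternative.
-- A's inner while-loop 'while run_end < len(lines) and lines[run_end].strip() == "-"'
def runEndA (lines : List String) (j : Nat) : Nat :=
  if h : j < lines.length then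
    if PySem.Str.strip lines[j] == "-" then runEndA lines (j + 1) else j
  else j
termination_by lines.length - j

theorem runEndA_ge (lines : List String) (j : Nat) : j ≤ runEndA lines j := by
  fun_induction runEndA lines j with
  | case1 j h hd ih => omega
  | case2 j h hd => omega
  | case3 j h => omega

-- A's outer while-loop, state = (i, result)
def goA (lines : List String) (i : Nat) (result : List String) : List String :=
  if h : i < lines.length then
    if PySem.Str.strip lines[i] == "-" then
      let run_end := runEndA lines i
      let result' := if run_end - i == 1 then result ++ ["-", "-"]
        else result ++ PySem.List.slice lines (some (i : Int)) (some (run_end : Int))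
      goA lines run_end result'
    else
      goA lines (i + 1) (result ++ [lines[i]])
  else result
termination_by lines.length - i
decreasing_by
  · rename_i hd
    have h1 : runEndA lines i = runEndA lines (i + 1) := by
      rw [runEndA]; simp [h, hd]
    have h2 := runEndA_ge lines (i + 1)
    omega
  · omega

def expand_single_dash_runs_py (lines : List String) : List String :=
  goA lines 0 []

-- ===== PORT B =====
-- 's.strip() == "-"' (the dash-mask predicate of Source B's list comprehension)
def pB (s : String) : Bool := PySem.Str.strip s == "-"

-- one iteration of Source B's for-loop over the zipped (prev, cur, nxt, s) tuples
def stepB (out : List String) (t : ((Bool × Bool) × Bool) × String) : List String :=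
  out ++ (if t.1.1.2 && !t.1.1.1 && !t.1.2 then ["-", "-"] else [t.2])

def expand_single_dash_runs_py_alt (lines : List String) : List String :=
  let dashes := lines.map pB
  ((((false :: dashes).zip dashes).zip (dashes.drop 1 ++ [false])).zip lines).foldl stepB []

-- ===== PRECONDITION & SPEC =====
def Spec_expand_single_dash_runs_py (lines : List String) (out : List String) : Prop := out = expand_single_dash_runs_py_alt lines
instance (lines : List String) (out : List String) : Decidable (Spec_expand_single_dash_runs_py lines out) := by unfold Spec_expand_single_dash_runs_py; infer_instance

-- ===== CLAIM (what is proved, stated in full; the proofs are below) =====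
def Claim_equal_expand_single_dash_runs_py : Prop := ∀ (lines : List String), Dom_expand_single_dash_runs_py lines → Spec_expand_single_dash_runs_py lines (expand_single_dash_runs_py lines)

-- ===== LEMMAS AND PROOFS =====
-- A run of exactly one dash becomes two literal dashes (A's run_len == 1 branch)
def flushB (run : List String) : List String :=
  if run.length == 1 then ["-", "-"] else run

-- canonical run-buffer recursion A's while-loop reduces to
def gRun (run : List String) : List String → List String
  | [] => flushB run
  | x :: xs =>
      if pB x then gRun (run ++ [x]) xs
      else flushB run ++ x :: gRun [] xs

-- is the head of the suffix a dash line?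
def headDash : List String → Bool
  | [] => false
  | y :: _ => pB y

-- canonical local recursion B's zipped fold reduces to (prev = dashness of previous line)
def loc (prev : Bool) : List String → List String
  | [] => []
  | x :: xs => (if pB x && !prev && !headDash xs then ["-", "-"] else [x]) ++ loc (pB x) xs

theorem foldB (xs : List String) : ∀ (prev : Bool) (acc : List String),
    ((((prev :: xs.map pB).zip (xs.map pB)).zip ((xs.map pB).drop 1 ++ [false])).zip xs).foldl stepB acc
      = acc ++ loc prev xs := by
  induction xs with
  | nil => intro prev acc; simp [loc]
  | cons x xs ih =>
      intro prev acc
      cases xs with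
      | nil => simp [loc, stepB, headDash]
      | cons y ys =>
          have hih := ih (pB x) (acc ++ (if pB x && !prev && !pB y then ["-", "-"] else [x]))
          simp [stepB, loc, headDash] at hih ⊢
          exact hih

theorem loc_prev_irrel (xs : List String) (h : headDash xs = false) :
    loc true xs = loc false xs := by
  cases xs with
  | nil => rfl
  | cons x xs =>
      simp only [headDash] at h
      simp [loc, h]

theorem gRun_loc (xs : List String) :
    gRun [] xs = loc false xs ∧
    (∀ run : List String, 2 ≤ run.length → gRun run xs = run ++ loc true xs) ∧
    (∀ r : String, gRun [r] xs
        = if headDash xs then r :: loc true xs else "-" :: "-" :: loc false xs) := by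
  induction xs with
  | nil =>
      refine ⟨rfl, ?_, ?_⟩
      · intro run h
        have : (run.length == 1) = false := by
          simp; omega
        simp [gRun, flushB, this, loc]
      · intro r; simp [gRun, flushB, headDash, loc]
  | cons x xs ih =>
      obtain ⟨ih1, ih2, ih3⟩ := ih
      by_cases hx : pB x
      · refine ⟨?_, ?_, ?_⟩
        · -- gRun [] (x :: xs) = gRun [x] xs
          have h3 := ih3 x
          by_cases hh : headDash xs = true
          · simp [gRun, hx, h3, hh, loc]
          · simp only [Bool.not_eq_true] at hh
            simp [gRun, hx, h3, hh, loc, loc_prev_irrel xs hh]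
        · intro run hrun
          have h2 := ih2 (run ++ [x]) (by simp; omega)
          simp [gRun, hx, h2, loc]
        · intro r
          have h2 := ih2 [r, x] (by simp)
          simp [gRun, hx, h2, headDash, loc]
      · refine ⟨?_, ?_, ?_⟩
        · simp [gRun, hx, flushB, loc, headDash, ih1]
        · intro run hrun
          have : (run.length == 1) = false := by simp; omega
          simp [gRun, hx, flushB, this, loc, headDash, ih1]
        · intro r
          simp [gRun, hx, flushB, loc, headDash, ih1]

-- helpers for reducing A's loop
theorem dropWhile_eq_drop_len {α : Type} (p : α → Bool) (xs : List α) :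
    xs.dropWhile p = xs.drop (xs.takeWhile p).length := by
  induction xs with
  | nil => simp
  | cons x xs ih =>
      by_cases h : p x
      · simp [h, ih]
      · simp [h]

theorem gRun_split (xs : List String) : ∀ run,
    gRun run xs = flushB (run ++ xs.takeWhile pB) ++ gRun [] (xs.dropWhile pB) := by
  induction xs with
  | nil => intro run; simp [gRun, flushB]
  | cons x xs ih =>
      intro run
      by_cases hd : pB x
      · simp only [gRun, hd, List.takeWhile_cons, List.dropWhile_cons]
        simp only [if_true]
        rw [ih (run ++ [x])]
        simp
      · have h0 : flushB ([] : List String) = [] := by simp [flushB]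
        simp only [gRun, List.takeWhile_cons, List.dropWhile_cons, hd]
        simp [gRun, hd, h0]

theorem runEndA_eq (lines : List String) : ∀ i,
    runEndA lines i = i + ((lines.drop i).takeWhile pB).length := by
  intro i
  fun_induction runEndA lines i with
  | case1 j h hd ih =>
      have hdrop : lines.drop j = lines[j] :: lines.drop (j + 1) :=
        List.drop_eq_getElem_cons h
      have hd' : pB lines[j] = true := by simpa [pB] using hd
      rw [ih, hdrop, List.takeWhile_cons]
      simp [hd']; omega
  | case2 j h hd =>
      have hdrop : lines.drop j = lines[j] :: lines.drop (j + 1) :=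
        List.drop_eq_getElem_cons h
      have hd' : pB lines[j] = false := by simpa [pB] using hd
      rw [hdrop, List.takeWhile_cons]
      simp [hd']
  | case3 j h =>
      have : lines.drop j = [] := List.drop_eq_nil_of_le (by omega)
      simp [this]

theorem goA_eq (lines : List String) : ∀ i result,
    goA lines i result = result ++ gRun [] (lines.drop i) := by
  intro i result
  fun_induction goA lines i result with
  | case1 i result h hd run_end result' ih =>
      have hdrop : lines.drop i = lines[i] :: lines.drop (i + 1) :=
        List.drop_eq_getElem_cons h
      have hre : run_end = i + ((lines.drop i).takeWhile pB).length :=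
        runEndA_eq lines i
      have hpos : 1 ≤ ((lines.drop i).takeWhile pB).length := by
        rw [hdrop, List.takeWhile_cons]; simp [pB, hd]
      have htake : (lines.drop i).take ((lines.drop i).takeWhile pB).length
          = (lines.drop i).takeWhile pB :=
        (List.prefix_iff_eq_take.mp (List.takeWhile_prefix _)).symm
      have hslice : PySem.List.slice lines (some (i : Int)) (some (run_end : Int))
          = (lines.drop i).takeWhile pB := by
        rw [hre, PySem.List.slice_natCast]
        simpa using htake
      have hres : result' = result ++ flushB ((lines.drop i).takeWhile pB) := by
        have hr' : result' = if (run_end - i == 1) = true then result ++ ["-", "-"]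
            else result ++ PySem.List.slice lines (some (i : Int)) (some (run_end : Int)) := rfl
        have hlen : run_end - i = ((lines.drop i).takeWhile pB).length := by
          omega
        rw [hr', hslice, flushB, hlen]
        split_ifs with h1 <;> rfl
      have hdw : lines.drop run_end = (lines.drop i).dropWhile pB := by
        rw [hre, dropWhile_eq_drop_len, ← List.drop_drop]
      rw [ih, hres, hdw, gRun_split (lines.drop i) []]
      simp
  | case2 i result h hd ih =>
      have hdrop : lines.drop i = lines[i] :: lines.drop (i + 1) :=
        List.drop_eq_getElem_cons h
      rw [ih, hdrop]
      have hd' : pB lines[i] = false := by simpa [pB] using hd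
      simp [gRun, hd', flushB]
  | case3 i result h =>
      have : lines.drop i = [] := List.drop_eq_nil_of_le (by omega)
      simp [this, gRun, flushB]

-- ===== VERDICT (by name: the statement is the Claim_ definition above) =====
theorem expand_single_dash_runs_py_spec : Claim_equal_expand_single_dash_runs_py := by
  intro lines _
  unfold Spec_expand_single_dash_runs_py expand_single_dash_runs_py expand_single_dash_runs_py_alt
  rw [goA_eq]
  have hB := foldB lines false []
  simp only [List.nil_append, List.drop_zero] at hB ⊢
  rw [hB, (gRun_loc lines).1]
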